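-- pv_equiv track=rewrite | github.com/maoakeEnterprise/amazing | src/amaz_lib/generators/kruskal.py | is_in_same_set
-- ===== SOURCE A (Python) =====
-- def is_in_same_set(sets: list[list[int]], wall: tuple[int, int]) -> bool:
--     a, b = wall
--     for set in sets:
--         if a in set and b in set:
--             return True
--         if a in set or b in set:
--             return False
--     return False
-- ===== SOURCE B (Python) =====
-- def is_in_same_set(sets: list[list[int]], wall: tuple[int, int]) -> bool:
--     a, b = wall
--     loc = {}
--     for i, s in enumerate(sets):
--         for x in s:
--             if x not in loc:
--                 loc[x] = i
--     ia = loc.get(a)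
--     ib = loc.get(b)
--     return ia is not None and ia == ib
-- ===== Notes on version B (the rewrite author's own statement) =====
-- stated objective: idiomatic
-- what changed: Replaces A's early-exit per-set membership scan with building a dict mapping each element to the index of the first set containing it, then comparing two constant-time lookups.
import Mathlib
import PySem

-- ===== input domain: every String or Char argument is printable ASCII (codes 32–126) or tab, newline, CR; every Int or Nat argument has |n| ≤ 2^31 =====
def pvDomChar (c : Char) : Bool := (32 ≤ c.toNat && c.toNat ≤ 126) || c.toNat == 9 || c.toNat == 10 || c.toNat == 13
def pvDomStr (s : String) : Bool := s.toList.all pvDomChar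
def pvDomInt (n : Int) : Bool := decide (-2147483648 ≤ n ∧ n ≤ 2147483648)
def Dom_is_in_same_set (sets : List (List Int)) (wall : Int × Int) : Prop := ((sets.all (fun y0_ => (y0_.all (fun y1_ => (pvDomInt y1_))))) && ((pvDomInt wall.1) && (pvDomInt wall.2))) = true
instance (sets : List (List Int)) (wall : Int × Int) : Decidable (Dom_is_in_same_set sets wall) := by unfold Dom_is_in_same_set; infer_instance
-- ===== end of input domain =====

-- B replaces A's early-exit per-set scan with a first-containing-set index dict built once, then two lookups (idiomatic; same return value).


-- ===== PORT A =====
def is_in_same_set (sets : List (List Int)) (wall : Int × Int) : Bool :=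
  match sets with
  | [] => false
  | s :: rest =>
    if s.contains wall.1 && s.contains wall.2 then true
    else if s.contains wall.1 || s.contains wall.2 then false
    else is_in_same_set rest wall

-- ===== PORT B =====
-- the dict build loop of Source B: for i, s in enumerate(sets): for x in s: if x not in loc: loc[x] = i
def pvBuildLoc (sets : List (List Int)) : PySem.Dict Int Int :=
  (PySem.List.enumerate sets 0).foldl
    (fun d p => p.2.foldl (fun d x => if d.contains x then d else d.insert x p.1) d)
    PySem.Dict.empty

def is_in_same_set_alt (sets : List (List Int)) (wall : Int × Int) : Bool :=
  let loc := pvBuildLoc sets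
  match loc.get? wall.1, loc.get? wall.2 with
  | some ia, some ib => ia == ib
  | _, _ => false

-- ===== PRECONDITION & SPEC =====
def Spec_is_in_same_set (sets : List (List Int)) (wall : Int × Int) (out : Bool) : Prop := out = is_in_same_set_alt sets wall
instance (sets : List (List Int)) (wall : Int × Int) (out : Bool) : Decidable (Spec_is_in_same_set sets wall out) := by unfold Spec_is_in_same_set; infer_instance

-- ===== CLAIM (what is proved, stated in full; the proofs are below) =====
def Claim_equal_is_in_same_set : Prop := ∀ (sets : List (List Int)) (wall : Int × Int), Dom_is_in_same_set sets wall → Spec_is_in_same_set sets wall (is_in_same_set sets wall)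

-- ===== LEMMAS AND PROOFS =====

-- index of the first set containing x, starting count at i
def pvFirstIdx (sets : List (List Int)) (i : Int) (x : Int) : Option Int :=
  match sets with
  | [] => none
  | s :: rest => if s.contains x then some i else pvFirstIdx rest (i + 1) x

theorem pvFirstIdx_ge (sets : List (List Int)) (i : Int) (x j : Int)
    (h : pvFirstIdx sets i x = some j) : i ≤ j := by
  induction sets generalizing i with
  | nil => simp [pvFirstIdx] at h
  | cons s rest ih =>
    unfold pvFirstIdx at h
    split at h
    · simp only [Option.some.injEq] at h; omega
    · have := ih (i + 1) h; omega

theorem pvInnerFold (s : List Int) (d : PySem.Dict Int Int) (i y : Int) :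
    (s.foldl (fun d x => if d.contains x then d else d.insert x i) d).get? y
      = ((d.get? y).or (if s.contains y then some i else none)) := by
  induction s generalizing d with
  | nil => simp
  | cons x rest ih =>
    simp only [List.foldl_cons, ih]
    by_cases hdx : d.contains x = true
    · simp only [hdx, if_pos]
      by_cases hxy : x = y
      · subst hxy
        rw [PySem.Dict.contains_eq_isSome_get?] at hdx
        cases hget : d.get? x with
        | none => rw [hget] at hdx; simp at hdx
        | some v => simp [Option.or]
      · simp [Ne.symm hxy]
    · simp only [hdx, Bool.false_eq_true, if_neg, not_false_iff]
      by_cases hxy : x = y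
      · subst hxy
        have hnone : d.get? x = none := by
          rw [PySem.Dict.contains_eq_isSome_get?] at hdx
          cases hget : d.get? x with
          | none => rfl
          | some v => rw [hget] at hdx; simp at hdx
        rw [PySem.Dict.get?_insert_self, hnone]
        simp [Option.or]
      · rw [PySem.Dict.get?_insert_of_ne _ _ (Ne.symm hxy)]
        simp [Ne.symm hxy]

theorem pvOuterFold (sets : List (List Int)) (d : PySem.Dict Int Int) (i y : Int) :
    ((PySem.List.enumerate sets i).foldl
        (fun d p => p.2.foldl (fun d x => if d.contains x then d else d.insert x p.1) d) d).get? y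
      = (d.get? y).or (pvFirstIdx sets i y) := by
  induction sets generalizing d i with
  | nil => simp [PySem.List.enumerate_nil, pvFirstIdx]
  | cons s rest ih =>
    rw [PySem.List.enumerate_cons]
    simp only [List.foldl_cons, ih, pvInnerFold, pvFirstIdx]
    by_cases hm : y ∈ s
    · cases hd : d.get? y <;> simp [hm, Option.or]
    · cases hd : d.get? y <;> simp [hm, Option.or]

theorem pvLoc_eq (sets : List (List Int)) (y : Int) :
    (pvBuildLoc sets).get? y = pvFirstIdx sets 0 y := by
  unfold pvBuildLoc
  rw [pvOuterFold]
  rfl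

theorem pvMain (sets : List (List Int)) (a b i : Int) :
    is_in_same_set sets (a, b)
      = (match pvFirstIdx sets i a, pvFirstIdx sets i b with
         | some ia, some ib => ia == ib
         | _, _ => false) := by
  induction sets generalizing i with
  | nil => simp [is_in_same_set, pvFirstIdx]
  | cons s rest ih =>
    by_cases ha : a ∈ s <;> by_cases hb : b ∈ s
    · simp [is_in_same_set, pvFirstIdx, ha, hb]
    · cases hfb : pvFirstIdx rest (i + 1) b with
      | none => simp [is_in_same_set, pvFirstIdx, ha, hb, hfb]
      | some j =>
        have hij := pvFirstIdx_ge rest (i + 1) b j hfb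
        have hne : i ≠ j := by omega
        simp [is_in_same_set, pvFirstIdx, ha, hb, hfb, hne]
    · cases hfa : pvFirstIdx rest (i + 1) a with
      | none => simp [is_in_same_set, pvFirstIdx, ha, hb, hfa]
      | some j =>
        have hij := pvFirstIdx_ge rest (i + 1) a j hfa
        have hne : j ≠ i := by omega
        simp [is_in_same_set, pvFirstIdx, ha, hb, hfa, hne]
    · simpa [is_in_same_set, pvFirstIdx, ha, hb] using ih (i + 1)

-- ===== VERDICT (by name: the statement is the Claim_ definition above) =====
theorem is_in_same_set_spec : Claim_equal_is_in_same_set := by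
  intro sets wall _
  unfold Spec_is_in_same_set is_in_same_set_alt
  obtain ⟨a, b⟩ := wall
  show is_in_same_set sets (a, b)
      = (match (pvBuildLoc sets).get? a, (pvBuildLoc sets).get? b with
         | some ia, some ib => ia == ib
         | _, _ => false)
  rw [pvLoc_eq, pvLoc_eq]
  exact pvMain sets a b 0
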